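-- pv_equiv track=rewrite | github.com/djeada/Nauka-Programowania | src/python/16_System_binarny/Zad9.py | odwroc_wielkosc_liter
-- ===== SOURCE A (Python) =====
-- def odwroc_wielkosc_liter(slowo):
--     """
--     Funkcja zamienia male litery na wielkie litery i wielkie litery na male litery.
--     """
--     wynik = ""
--
--     for litera in slowo:
--         if litera >= "a" and litera <= "z":
--             wynik += chr(ord(litera) ^ ord(" "))
--
--         elif litera >= "A" and litera <= "Z":
--             wynik += chr(ord(litera) ^ ord(" "))
--
--         else:
--             wynik += litera
--
--     return wynik
-- ===== SOURCE B (Python) =====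
-- _SWAP = str.maketrans(
--     "abcdefghijklmnopqrstuvwxyzABCDEFGHIJKLMNOPQRSTUVWXYZ",
--     "ABCDEFGHIJKLMNOPQRSTUVWXYZabcdefghijklmnopqrstuvwxyz",
-- )
--
-- def odwroc_wielkosc_liter(slowo):
--     return slowo.translate(_SWAP)
-- ===== Notes on version B (the rewrite author's own statement) =====
-- stated objective: idiomatic
-- what changed: Replaces the per-character branch-and-concatenate loop with a translation table built once (str.maketrans over exactly the 52 ASCII letters) and a single str.translate call (C-level pass); non-letters pass through unchanged as in A's else branch.
import Mathlib
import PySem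

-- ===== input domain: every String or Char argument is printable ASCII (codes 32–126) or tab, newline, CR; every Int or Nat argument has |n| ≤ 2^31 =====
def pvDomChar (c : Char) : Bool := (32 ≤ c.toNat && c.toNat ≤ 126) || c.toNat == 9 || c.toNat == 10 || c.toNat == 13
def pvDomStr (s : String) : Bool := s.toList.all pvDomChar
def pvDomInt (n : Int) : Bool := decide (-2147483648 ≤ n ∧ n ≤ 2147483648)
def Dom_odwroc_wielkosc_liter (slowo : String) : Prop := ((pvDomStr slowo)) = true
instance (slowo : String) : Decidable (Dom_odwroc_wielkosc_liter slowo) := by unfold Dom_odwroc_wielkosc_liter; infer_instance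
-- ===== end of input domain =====

-- B replaces A's per-character branch-and-concatenate loop by a 52-letter translation table
-- built once and a single lookup pass (idiomatic; return value only, no side effects).


-- ===== PORT A =====
-- Python strings are modelled as their lists of characters; 'wynik += x' is list append.
def odwroc_wielkosc_liter (slowo : String) : String :=
  String.mk (slowo.toList.foldl (fun wynik litera =>
    if 'a' ≤ litera ∧ litera ≤ 'z' then
      wynik ++ [Char.ofNat (litera.toNat ^^^ (' ').toNat)]
    else if 'A' ≤ litera ∧ litera ≤ 'Z' then
      wynik ++ [Char.ofNat (litera.toNat ^^^ (' ').toNat)]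
    else
      wynik ++ [litera]) [])

-- ===== PORT B =====
-- the translation table of Source B: each ASCII letter mapped to its case-swapped counterpart
def pvSwapTable : PySem.Dict Char Char :=
  PySem.Dict.ofList
    ("abcdefghijklmnopqrstuvwxyzABCDEFGHIJKLMNOPQRSTUVWXYZ".toList.zip
     "ABCDEFGHIJKLMNOPQRSTUVWXYZabcdefghijklmnopqrstuvwxyz".toList)

-- str.translate: every character is replaced by its table entry, or kept if absent
def odwroc_wielkosc_liter_alt (slowo : String) : String :=
  String.mk (slowo.toList.map (fun c => pvSwapTable.getD c c))

-- ===== PRECONDITION & SPEC =====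
def Spec_odwroc_wielkosc_liter (slowo : String) (out : String) : Prop := out = odwroc_wielkosc_liter_alt slowo
instance (slowo : String) (out : String) : Decidable (Spec_odwroc_wielkosc_liter slowo out) := by unfold Spec_odwroc_wielkosc_liter; infer_instance

-- ===== CLAIM (what is proved, stated in full; the proofs are below) =====
def Claim_equal_odwroc_wielkosc_liter : Prop := ∀ (slowo : String), Dom_odwroc_wielkosc_liter slowo → Spec_odwroc_wielkosc_liter slowo (odwroc_wielkosc_liter slowo)

-- ===== LEMMAS AND PROOFS =====

-- A's per-character transformation
def pvStepA (litera : Char) : Char :=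
  if 'a' ≤ litera ∧ litera ≤ 'z' then Char.ofNat (litera.toNat ^^^ (' ').toNat)
  else if 'A' ≤ litera ∧ litera ≤ 'Z' then Char.ofNat (litera.toNat ^^^ (' ').toNat)
  else litera

lemma pvFoldA (l : List Char) (acc : List Char) :
    l.foldl (fun wynik litera =>
      if 'a' ≤ litera ∧ litera ≤ 'z' then
        wynik ++ [Char.ofNat (litera.toNat ^^^ (' ').toNat)]
      else if 'A' ≤ litera ∧ litera ≤ 'Z' then
        wynik ++ [Char.ofNat (litera.toNat ^^^ (' ').toNat)]
      else
        wynik ++ [litera]) acc = acc ++ l.map pvStepA := by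
  induction l generalizing acc with
  | nil => simp
  | cons c t ih =>
      simp only [List.foldl_cons, List.map_cons, ih, pvStepA]
      split_ifs <;> simp

set_option maxRecDepth 20000 in
lemma pvPoint (c : Char) (h : c.toNat ≤ 126) : pvSwapTable.getD c c = pvStepA c := by
  have key : ∀ n : Fin 127, pvSwapTable.getD (Char.ofNat n.val) (Char.ofNat n.val)
      = pvStepA (Char.ofNat n.val) := by decide
  have hv := key ⟨c.toNat, by omega⟩
  simpa using hv

-- ===== VERDICT (by name: the statement is the Claim_ definition above) =====
set_option maxRecDepth 20000 in
theorem odwroc_wielkosc_liter_spec : Claim_equal_odwroc_wielkosc_liter := by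
  intro slowo hdom
  unfold Spec_odwroc_wielkosc_liter odwroc_wielkosc_liter odwroc_wielkosc_liter_alt
  rw [pvFoldA]
  congr 1
  apply List.map_congr_left
  intro c hc
  have hd : pvDomChar c = true := by
    have := (List.all_eq_true.mp hdom) c hc
    simpa using this
  have hle : c.toNat ≤ 126 := by
    simp [pvDomChar] at hd
    omega
  exact (pvPoint c hle).symm
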